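-- pv_equiv track=rewrite | github.com/leleodasso/Lab07 | model/model.py | almeno_tre_consecutivi
-- ===== SOURCE A (Python) =====
-- def almeno_tre_consecutivi(lista_usati, giorno_aggiunto):
--     if len(lista_usati) <= 1:  # se siamo all'inizio return True
--         return True
--     if lista_usati[-1]["Localita"] == giorno_aggiunto[
--         "Localita"]:  # se la citta precedente è uguale a quella attuale
--         return True
--
--     conta_consecutivi = 1
--     for i in range(len(lista_usati) - 2, -1, -1):
--         if lista_usati[i]["Localita"] == lista_usati[-1]["Localita"]:
--             conta_consecutivi += 1
--         else:
--             break
--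
--     if conta_consecutivi >= 3:
--         return True
--     else:
--         return False
-- ===== SOURCE B (Python) =====
-- def almeno_tre_consecutivi(lista_usati, giorno_aggiunto):
--     if len(lista_usati) <= 1:
--         return True
--     ultima = lista_usati[-1]["Localita"]
--     if ultima == giorno_aggiunto["Localita"]:
--         return True
--     # the trailing run reaches 3 exactly when the two entries before the last one
--     # also carry the last locality
--     return (len(lista_usati) >= 3
--             and lista_usati[-2]["Localita"] == ultima
--             and lista_usati[-3]["Localita"] == ultima)
-- ===== Notes on version B (the rewrite author's own statement) =====
-- stated objective: simpler
-- what changed: B drops A's backward counting loop entirely: after the two unchanged guards it decides the result by directly checking whether the two entries before the last share the last entry's locality, which is exactly when A's trailing-run count reaches 3.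
import Mathlib
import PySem

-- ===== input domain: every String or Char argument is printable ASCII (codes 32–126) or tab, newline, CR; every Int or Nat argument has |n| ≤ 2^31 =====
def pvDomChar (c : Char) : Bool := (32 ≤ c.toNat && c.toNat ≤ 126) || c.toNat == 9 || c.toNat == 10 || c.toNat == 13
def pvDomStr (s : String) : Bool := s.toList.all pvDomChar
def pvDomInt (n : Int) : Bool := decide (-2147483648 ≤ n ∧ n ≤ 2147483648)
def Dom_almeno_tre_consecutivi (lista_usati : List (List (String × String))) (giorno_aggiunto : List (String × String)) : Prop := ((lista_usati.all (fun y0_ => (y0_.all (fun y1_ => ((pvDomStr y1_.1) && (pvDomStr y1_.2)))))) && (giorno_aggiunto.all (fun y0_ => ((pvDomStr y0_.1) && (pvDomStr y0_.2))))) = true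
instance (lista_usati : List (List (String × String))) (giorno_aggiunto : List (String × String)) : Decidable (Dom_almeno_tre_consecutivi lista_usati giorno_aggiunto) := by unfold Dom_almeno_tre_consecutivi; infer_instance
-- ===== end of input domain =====

-- B replaces A's backward counting loop by a direct O(1) check of the two entries
-- before the last one (objective: simpler; the loop disappears).

-- d["Localita"] on an insertion-ordered dict given as an association list (first match);
-- default "" is only reached outside Pre_, where the Python raises KeyError.
def pyLoc (d : List (String × String)) : String :=
  (((d.find? (fun p => p.1 == "Localita")).map Prod.snd).getD "")

-- ===== PORT A =====
-- the backward for-loop with break: one recursive step per index of the countdown range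
def aLoop (l : List (List (String × String))) : List Int → Int → Int
  | [], c => c
  | i :: rest, c =>
      if pyLoc ((PySem.List.pyGet? l i).getD []) ==
         pyLoc ((PySem.List.pyGet? l (-1)).getD []) then
        aLoop l rest (c + 1)
      else c

def almeno_tre_consecutivi (lista_usati : List (List (String × String))) (giorno_aggiunto : List (String × String)) : Bool :=
  if lista_usati.length ≤ 1 then true
  else if pyLoc ((PySem.List.pyGet? lista_usati (-1)).getD []) == pyLoc giorno_aggiunto then true
  else
    let conta := aLoop lista_usati
      (PySem.List.pyRange ((lista_usati.length : Int) - 2) (-1) (-1)) 1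
    if conta ≥ 3 then true else false

-- ===== PORT B =====
def almeno_tre_consecutivi_alt (lista_usati : List (List (String × String))) (giorno_aggiunto : List (String × String)) : Bool :=
  if lista_usati.length ≤ 1 then true
  else
    let ultima := pyLoc ((PySem.List.pyGet? lista_usati (-1)).getD [])
    if ultima == pyLoc giorno_aggiunto then true
    else
      decide (3 ≤ lista_usati.length)
        && (pyLoc ((PySem.List.pyGet? lista_usati (-2)).getD []) == ultima)
        && (pyLoc ((PySem.List.pyGet? lista_usati (-3)).getD []) == ultima)

-- ===== PRECONDITION & SPEC =====
def hasLoc (d : List (String × String)) : Bool := d.any (fun p => p.1 == "Localita")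

-- Pre_ excludes exactly the inputs on which Python A raises KeyError: with two or more
-- used days, some dict A actually reads (the last one, giorno_aggiunto, or an entry
-- reached by the backward scan through key-having matching entries) lacks "Localita".
def Pre_almeno_tre_consecutivi (lista_usati : List (List (String × String))) (giorno_aggiunto : List (String × String)) : Prop :=
  lista_usati.length ≤ 1 ∨
    (hasLoc (lista_usati.getLast?.getD []) = true ∧ hasLoc giorno_aggiunto = true ∧
      (pyLoc (lista_usati.getLast?.getD []) = pyLoc giorno_aggiunto ∨
        ∀ i < lista_usati.length,
          (∀ j < lista_usati.length, i < j →
              hasLoc (lista_usati.getD j []) = true ∧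
              pyLoc (lista_usati.getD j []) = pyLoc (lista_usati.getLast?.getD [])) →
          hasLoc (lista_usati.getD i []) = true))
instance (lista_usati : List (List (String × String))) (giorno_aggiunto : List (String × String)) : Decidable (Pre_almeno_tre_consecutivi lista_usati giorno_aggiunto) := by unfold Pre_almeno_tre_consecutivi; infer_instance

def pvWitness_almeno_tre_consecutivi : (List (List (String × String))) × (List (String × String)) :=
  ([[("Localita", "a")], [("Localita", "b")]], [("Localita", "a")])

def Spec_almeno_tre_consecutivi (lista_usati : List (List (String × String))) (giorno_aggiunto : List (String × String)) (out : Bool) : Prop := out = almeno_tre_consecutivi_alt lista_usati giorno_aggiunto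
instance (lista_usati : List (List (String × String))) (giorno_aggiunto : List (String × String)) (out : Bool) : Decidable (Spec_almeno_tre_consecutivi lista_usati giorno_aggiunto out) := by unfold Spec_almeno_tre_consecutivi; infer_instance

-- ===== CLAIM (what is proved, stated in full; the proofs are below) =====
def Claim_equal_almeno_tre_consecutivi : Prop := ∀ (lista_usati : List (List (String × String))) (giorno_aggiunto : List (String × String)), Dom_almeno_tre_consecutivi lista_usati giorno_aggiunto → Pre_almeno_tre_consecutivi lista_usati giorno_aggiunto → Spec_almeno_tre_consecutivi lista_usati giorno_aggiunto (almeno_tre_consecutivi lista_usati giorno_aggiunto)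

-- ===== LEMMAS AND PROOFS =====

-- A's loop computes 1 + (length of the trailing run of entries, below the last,
-- whose locality equals the last locality)
theorem aLoop_count (l : List (List (String × String))) (m : Nat) (c : Int) (hm : m ≤ l.length) :
    aLoop l (PySem.List.pyRange ((m : Int) - 1) (-1) (-1)) c
      = c + ((((l.take m).map pyLoc).reverse.takeWhile
              (fun y => y == pyLoc ((PySem.List.pyGet? l (-1)).getD []))).length : Int) := by
  induction m generalizing c with
  | zero =>
    rw [PySem.List.pyRange_neg_one_eq_nil (by omega)]
    simp [aLoop]
  | succ m ih =>
    have hm' : m ≤ l.length := by omega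
    have hlt : m < l.length := by omega
    have hcast : ((m + 1 : Nat) : Int) - 1 = (m : Int) := by push_cast; ring
    rw [hcast, PySem.List.pyRange_neg_one_cons (by omega)]
    have hget : PySem.List.pyGet? l ((m : Nat) : Int) = some l[m] :=
      PySem.List.pyGet?_ofNat l m hlt
    rw [List.take_add_one]
    simp only [List.getElem?_eq_getElem hlt, Option.toList_some, List.map_append,
      List.reverse_append, List.map_cons, List.map_nil, List.reverse_cons, List.reverse_nil,
      List.nil_append, List.cons_append, List.takeWhile_cons]
    unfold aLoop
    rw [hget]
    by_cases hb : (pyLoc l[m] == pyLoc ((PySem.List.pyGet? l (-1)).getD [])) = true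
    · simp only [hb, if_true, Option.getD_some]
      rw [ih (c+1) hm']
      simp
      omega
    · simp only [Option.getD_some, hb]
      simp at hb
      simp

-- the two ports agree on every input (key defaults included)
theorem main_eq (l : List (List (String × String))) (g : List (String × String)) :
    almeno_tre_consecutivi l g = almeno_tre_consecutivi_alt l g := by
  unfold almeno_tre_consecutivi almeno_tre_consecutivi_alt
  by_cases h1 : l.length ≤ 1
  · simp [h1]
  · simp only [h1, if_false]
    rcases l.eq_nil_or_concat with rfl | ⟨zs, d, rfl⟩
    · simp at h1
    · simp only [List.concat_eq_append] at h1 ⊢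
      have hlastA : PySem.List.pyGet? (zs ++ [d]) (-1) = some d :=
        PySem.List.pyGet?_neg_one_append_singleton zs d
      rw [hlastA]
      simp only [Option.getD_some]
      by_cases h2 : (pyLoc d == pyLoc g) = true
      · simp [h2]
      · simp only [h2, if_false]
        have hlen : ((zs ++ [d]).length : Int) - 2 = (zs.length : Int) - 1 := by
          simp; ring
        rw [hlen, aLoop_count (zs ++ [d]) zs.length 1 (by simp)]
        rw [List.take_left, hlastA]
        simp only [Option.getD_some]
        rcases zs.eq_nil_or_concat with rfl | ⟨ws, b, rfl⟩
        · simp at h1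
        · simp only [List.concat_eq_append]
          have hassoc : (ws ++ [b]) ++ [d] = ws ++ [b, d] := by simp
          have hm2 : PySem.List.pyGet? ((ws ++ [b]) ++ [d]) (-2) = some b := by
            rw [hassoc, PySem.List.pyGet?_neg_ofNat (ws ++ [b, d]) 2 (by omega) (by simp)]
            simp [List.getElem?_append_right]
          rw [hm2]
          simp only [Option.getD_some, List.map_append, List.map_cons, List.map_nil,
            List.reverse_append, List.reverse_cons, List.reverse_nil, List.nil_append,
            List.cons_append, List.takeWhile_cons]
          by_cases hb : (pyLoc b == pyLoc d) = true
          · simp only [hb, if_true]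
            rcases ws.eq_nil_or_concat with rfl | ⟨vs, c, rfl⟩
            · simp
            · simp only [List.concat_eq_append]
              have hassoc3 : ((vs ++ [c]) ++ [b]) ++ [d] = vs ++ [c, b, d] := by simp
              have hm3 : PySem.List.pyGet? (((vs ++ [c]) ++ [b]) ++ [d]) (-3) = some c := by
                rw [hassoc3, PySem.List.pyGet?_neg_ofNat (vs ++ [c, b, d]) 3 (by omega) (by simp)]
                simp [List.getElem?_append_right]
              rw [hm3]
              simp only [Option.getD_some, List.map_append, List.map_cons, List.map_nil,
                List.reverse_append, List.reverse_cons, List.reverse_nil, List.nil_append,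
                List.cons_append, List.takeWhile_cons]
              by_cases hc : (pyLoc c == pyLoc d) = true
              · simp only [hc, if_true, List.length_cons]
                have h3 : (3 : Nat) ≤ (((vs ++ [c]) ++ [b]) ++ [d]).length := by simp
                simp only [h3, decide_eq_true_eq, decide_true, Bool.true_and, hb, hc,
                  Bool.and_true]
                simp only [Nat.cast_add, Nat.cast_one]
                have hge : (3:Int) ≤ 1 + ((((vs.map pyLoc).reverse.takeWhile
                    (fun y => y == pyLoc d)).length : Int) + 1 + 1) := by omega
                simp [hge, h3, hb, hc]
              · simp only [hc, if_false, List.length_cons, List.length_nil]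
                simp [hc]
          · simp only [hb, if_false]
            simp [hb]

-- ===== VERDICT (by name: the statement is the Claim_ definition above) =====
theorem almeno_tre_consecutivi_spec : Claim_equal_almeno_tre_consecutivi := by
  intro l g _ _
  exact main_eq l g
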